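-- pv_equiv track=rewrite | github.com/CatoLynx/pyDeutscheBahn | db_infoscreen/__init__.py | round_delay
-- ===== SOURCE A (Python) =====
-- def round_delay(delay):
--     if delay <= 0:
--         return 0
--
--     if delay > 210:
--         return -1 # delayed for unspecified amount of time
--
--     delay_groups = (list(range(0, 60, 5)) + list(range(60, 210, 10)))[::-1]
--     for g in delay_groups:
--         if delay >= g:
--             return g
-- ===== SOURCE B (Python) =====
-- def round_delay(delay):
--     if delay <= 0:
--         return 0
--     if delay > 210:
--         return -1
--     if delay < 60:
--         return int(delay // 5) * 5
--     return min(int(delay // 10) * 10, 200)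
-- ===== Notes on version B (the rewrite author's own statement) =====
-- stated objective: simpler
-- what changed: Replaces building a reversed threshold list and linearly scanning it with a closed-form arithmetic bucket: (delay//5)*5 below 60, min((delay//10)*10, 200) above.
import Mathlib
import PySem

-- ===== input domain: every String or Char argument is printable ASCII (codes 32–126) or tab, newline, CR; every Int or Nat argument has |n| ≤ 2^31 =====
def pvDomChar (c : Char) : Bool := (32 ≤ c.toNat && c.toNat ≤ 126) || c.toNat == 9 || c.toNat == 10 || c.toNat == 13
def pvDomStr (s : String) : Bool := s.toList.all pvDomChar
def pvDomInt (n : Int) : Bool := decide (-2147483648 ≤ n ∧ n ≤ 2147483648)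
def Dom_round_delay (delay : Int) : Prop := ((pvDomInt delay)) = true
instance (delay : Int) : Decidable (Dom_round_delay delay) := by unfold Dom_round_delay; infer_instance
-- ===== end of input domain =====

-- B replaces A's reversed-threshold-list scan with a closed-form arithmetic bucket (simpler).

-- ===== PORT A =====
-- the 'for g in delay_groups: if delay >= g: return g' loop; [] is unreachable in A's
-- call (the list ends in 0 and there delay ≥ 1), 0 stands in for Python's fall-through
def pvScanGroups (delay : Int) : List Int → Int
  | [] => 0
  | g :: rest => if delay ≥ g then g else pvScanGroups delay rest

def round_delay (delay : Int) : Int :=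
  if delay ≤ 0 then 0
  else if delay > 210 then -1
  else pvScanGroups delay ((PySem.List.pyRange 0 60 5 ++ PySem.List.pyRange 60 210 10).reverse)

-- ===== PORT B =====
def round_delay_alt (delay : Int) : Int :=
  if delay ≤ 0 then 0
  else if delay > 210 then -1
  else if delay < 60 then PySem.Int.floordiv delay 5 * 5
  else min (PySem.Int.floordiv delay 10 * 10) 200

-- ===== PRECONDITION & SPEC =====
def Spec_round_delay (delay : Int) (out : Int) : Prop := out = round_delay_alt delay
instance (delay : Int) (out : Int) : Decidable (Spec_round_delay delay out) := by unfold Spec_round_delay; infer_instance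

-- ===== CLAIM (what is proved, stated in full; the proofs are below) =====
def Claim_equal_round_delay : Prop := ∀ (delay : Int), Dom_round_delay delay → Spec_round_delay delay (round_delay delay)

-- ===== LEMMAS AND PROOFS =====
lemma pvGroups_eval :
    ((PySem.List.pyRange 0 60 5 ++ PySem.List.pyRange 60 210 10).reverse : List Int) =
      [200, 190, 180, 170, 160, 150, 140, 130, 120, 110, 100, 90, 80, 70, 60,
       55, 50, 45, 40, 35, 30, 25, 20, 15, 10, 5, 0] := by decide

-- on the 210 delays that reach the scan, it agrees with B's arithmetic bucket (finite check)
set_option maxRecDepth 10000 in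
lemma pvScan_eq_bucket : ∀ n : Nat, n < 210 →
    pvScanGroups ((n : Int) + 1)
      [200, 190, 180, 170, 160, 150, 140, 130, 120, 110, 100, 90, 80, 70, 60,
       55, 50, 45, 40, 35, 30, 25, 20, 15, 10, 5, 0] =
      (if ((n : Int) + 1) < 60 then PySem.Int.floordiv ((n : Int) + 1) 5 * 5
       else min (PySem.Int.floordiv ((n : Int) + 1) 10 * 10) 200) := by decide

-- ===== VERDICT (by name: the statement is the Claim_ definition above) =====
theorem round_delay_spec : Claim_equal_round_delay := by
  intro delay _
  unfold Spec_round_delay round_delay round_delay_alt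
  by_cases h0 : delay ≤ 0
  · simp [h0]
  · by_cases h210 : delay > 210
    · simp [h0, h210]
    · rw [if_neg h0, if_neg h210, if_neg h0, if_neg h210, pvGroups_eval]
      have hn : delay = ((delay - 1).toNat : Int) + 1 := by omega
      have hlt : (delay - 1).toNat < 210 := by omega
      rw [hn]
      exact pvScan_eq_bucket _ hlt
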